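-- pv_equiv track=rewrite | github.com/RoamLocaApp/roam-local-app-website | rewrite_faqs.py | strip_cta_tail
-- ===== SOURCE A (Python) =====
-- CTA_CUT_MARKERS = [
--     " Roam surfaces ",
--     " Roam shows you ",
--     " Download Roam",
--     " Download free",
--     " download free",
--     " download Roam",
--     " List your ",
-- ]
--
-- def strip_cta_tail(text):
--     """Remove any trailing CTA-style sentence from extracted text."""
--     if not text:
--         return text
--     for marker in CTA_CUT_MARKERS:
--         idx = text.find(marker)
--         if idx != -1:
--             text = text[:idx].rstrip()
--     # Ensure terminal punctuation
--     if text and text[-1] not in ".!?":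
--         text = text + "."
--     return text
-- ===== SOURCE B (Python) =====
-- CTA_CUT_MARKERS = [
--     " Roam surfaces ",
--     " Roam shows you ",
--     " Download Roam",
--     " Download free",
--     " download free",
--     " download Roam",
--     " List your ",
-- ]
--
-- def strip_cta_tail(text):
--     """Remove any trailing CTA-style sentence from extracted text.
--
--     Index-arithmetic variant: the current text is always a prefix of the
--     original, so we track only its length `l`.  Each marker is searched once
--     in the ORIGINAL string; its first occurrence is the first occurrence in
--     the current prefix exactly when it still fits inside it.  The rstrip is
--     done by decrementing `l`; a single slice is taken at the end.
--     """
--     if not text: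
--         return text
--     l = len(text)
--     for marker in CTA_CUT_MARKERS:
--         p = text.find(marker)
--         if p != -1 and p + len(marker) <= l:
--             l = p
--             while l > 0 and text[l - 1].isspace():
--                 l -= 1
--     out = text[:l]
--     if out and out[-1] not in ".!?":
--         out += "."
--     return out
-- ===== Notes on version B (the rewrite author's own statement) =====
-- stated objective: alternative
-- what changed: B tracks only the integer cut length: each marker is searched once in the original string (its first occurrence counts exactly when it still fits inside the current prefix) and the rstrip is done by decrementing the index, so no intermediate truncated/rstripped strings are built and a single slice is taken at the end.
import Mathlib
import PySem

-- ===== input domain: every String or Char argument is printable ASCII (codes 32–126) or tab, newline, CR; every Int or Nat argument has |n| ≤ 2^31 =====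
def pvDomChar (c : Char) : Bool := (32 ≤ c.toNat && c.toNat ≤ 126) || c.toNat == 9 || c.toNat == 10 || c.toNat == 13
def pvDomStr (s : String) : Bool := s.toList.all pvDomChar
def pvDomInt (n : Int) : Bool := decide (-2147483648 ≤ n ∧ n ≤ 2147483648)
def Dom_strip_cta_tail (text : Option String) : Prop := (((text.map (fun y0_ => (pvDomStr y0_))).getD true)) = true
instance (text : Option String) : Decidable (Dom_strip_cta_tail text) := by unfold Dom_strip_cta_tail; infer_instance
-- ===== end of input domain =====

-- B keeps only the integer cut length and searches each marker once in the original string,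
-- instead of A's rebuilding of truncated+rstripped strings; return values are identical.

-- ===== PORT A =====
def ctaMarkers : List (List Char) :=
  [" Roam surfaces ".toList, " Roam shows you ".toList, " Download Roam".toList,
   " Download free".toList, " download free".toList, " download Roam".toList,
   " List your ".toList]

-- idx = text.find(marker); if idx != -1: text = text[:idx].rstrip()
def stripAstep (t m : List Char) : List Char :=
  let idx := PySem.Chars.find t m
  if idx = -1 then t
  else PySem.Chars.rstrip (PySem.Chars.slice t none (some idx))

-- text[-1] not in ".!?"  (text[-1] is a one-character string; 'in' on it is char membership)
def lastNotPunctA (t : List Char) : Bool :=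
  match PySem.List.pyGet? t (-1) with
  | some c => !PySem.Chars.isIn [c] ".!?".toList
  | none => false

-- if text and text[-1] not in ".!?": text = text + "."
def addDotA (t : List Char) : List Char :=
  if t ≠ [] ∧ lastNotPunctA t = true then t ++ ['.'] else t

def strip_cta_tail (text : Option String) : Option String :=
  match text with
  | none => none
  | some s =>
    if s.toList = [] then some s
    else some (String.ofList (addDotA (ctaMarkers.foldl stripAstep s.toList)))

-- ===== PORT B =====
-- while l > 0 and text[l-1].isspace(): l -= 1
def rstripLen (cs : List Char) : Nat → Nat
  | 0 => 0
  | l + 1 => if (cs[l]?.any PySem.Chars.isspace) then rstripLen cs l else l + 1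

-- p = text.find(marker); if p != -1 and p + len(marker) <= l: l = p; <rstrip loop>
def stripBstep (cs : List Char) (l : Nat) (m : List Char) : Nat :=
  let p := PySem.Chars.find cs m
  if p ≠ -1 ∧ p + (m.length : Int) ≤ (l : Int) then rstripLen cs p.toNat else l

def lastNotPunctB (t : List Char) : Bool :=
  match PySem.List.pyGet? t (-1) with
  | some c => !PySem.Chars.isIn [c] ".!?".toList
  | none => false

def strip_cta_tail_alt (text : Option String) : Option String :=
  match text with
  | none => none
  | some s =>
    if s.toList = [] then some s
    else
      let cs := s.toList
      let l := ctaMarkers.foldl (stripBstep cs) cs.length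
      let out := cs.take l
      some (String.ofList (if out ≠ [] ∧ lastNotPunctB out = true then out ++ ['.'] else out))

-- ===== PRECONDITION & SPEC =====
def Spec_strip_cta_tail (text : Option String) (out : Option String) : Prop := out = strip_cta_tail_alt text
instance (text : Option String) (out : Option String) : Decidable (Spec_strip_cta_tail text out) := by unfold Spec_strip_cta_tail; infer_instance

-- ===== CLAIM (what is proved, stated in full; the proofs are below) =====
def Claim_equal_strip_cta_tail : Prop := ∀ (text : Option String), Dom_strip_cta_tail text → Spec_strip_cta_tail text (strip_cta_tail text)

-- ===== LEMMAS AND PROOFS =====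

theorem rstripLen_le (cs : List Char) : ∀ l, rstripLen cs l ≤ l := by
  intro l; induction l with
  | zero => simp [rstripLen]
  | succ n ih => unfold rstripLen; split <;> omega

theorem rstripLen_congr (cs ds : List Char) :
    ∀ l, (∀ k, k < l → cs[k]? = ds[k]?) → rstripLen cs l = rstripLen ds l := by
  intro l; induction l with
  | zero => intro _; rfl
  | succ n ih =>
    intro h
    unfold rstripLen
    rw [h n (by omega), ih (fun k hk => h k (by omega))]

theorem rstrip_eq_take (cs : List Char) :
    PySem.Chars.rstrip cs = cs.take (rstripLen cs cs.length) := by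
  induction cs using List.reverseRecOn with
  | nil => rfl
  | append_singleton ys a ih =>
    have hstep : rstripLen (ys ++ [a]) (ys.length + 1) =
        if PySem.Chars.isspace a then rstripLen ys ys.length else ys.length + 1 := by
      conv_lhs => rw [rstripLen]
      rw [List.getElem?_concat_length]
      by_cases ha : PySem.Chars.isspace a
      · rw [if_pos ha, if_pos (by simp [ha])]
        exact rstripLen_congr _ _ ys.length (fun k hk => List.getElem?_append_left hk)
      · rw [if_neg ha, if_neg (by simp [ha])]
    simp only [PySem.Chars.rstrip, List.reverse_append, List.reverse_cons, List.reverse_nil,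
      List.nil_append, List.cons_append, List.dropWhile_cons, List.length_append,
      List.length_cons, List.length_nil, Nat.zero_add, hstep] at *
    by_cases ha : PySem.Chars.isspace a
    · rw [if_pos ha, if_pos (by simp [ha]), ih,
        List.take_append_of_le_length (rstripLen_le ys ys.length)]
    · rw [if_neg ha, if_neg (by simp [ha])]
      simp

theorem rstrip_take_eq (cs : List Char) (p : Nat) (hp : p ≤ cs.length) :
    PySem.Chars.rstrip (cs.take p) = cs.take (rstripLen cs p) := by
  rw [rstrip_eq_take]
  have hl : (cs.take p).length = p := List.length_take_of_le hp
  rw [hl, rstripLen_congr (cs.take p) cs p (fun k hk => List.getElem?_take_of_lt hk),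
    List.take_take]
  congr 1
  exact Nat.min_eq_left (rstripLen_le cs p)

theorem prefix_drop_take_iff (m cs : List Char) (hm : m ≠ []) (i l : Nat) :
    m <+: (cs.take l).drop i ↔ m <+: cs.drop i ∧ i + m.length ≤ l := by
  rw [List.drop_take, List.prefix_take_iff]
  constructor
  · rintro ⟨h1, h2⟩
    have : 0 < m.length := List.length_pos_of_ne_nil hm
    exact ⟨h1, by omega⟩
  · rintro ⟨h1, h2⟩
    exact ⟨h1, by omega⟩

theorem infix_of_prefix_drop {m cs : List Char} {i : Nat} (h : m <+: cs.drop i) :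
    m <:+: cs :=
  h.isInfix.trans (List.drop_suffix i cs).isInfix

theorem find_take (cs m : List Char) (hm : m ≠ []) (l : Nat) :
    PySem.Chars.find (cs.take l) m =
      if PySem.Chars.find cs m ≠ -1 ∧ PySem.Chars.find cs m + (m.length : Int) ≤ (l : Int)
      then PySem.Chars.find cs m else -1 := by
  by_cases hp : PySem.Chars.find cs m = -1
  · rw [if_neg (by simp [hp])]
    rw [PySem.Chars.find_eq_neg_one_iff] at hp ⊢
    intro hinf
    exact hp (hinf.trans (cs.take_prefix l).isInfix)
  · have hp0 : 0 ≤ PySem.Chars.find cs m := by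
      have := PySem.Chars.neg_one_le_find cs m
      omega
    obtain ⟨hpre, hmin⟩ := PySem.Chars.find_spec hp0
    by_cases hfit : PySem.Chars.find cs m + (m.length : Int) ≤ (l : Int)
    · rw [if_pos ⟨hp, hfit⟩]
      have hfit' : (PySem.Chars.find cs m).toNat + m.length ≤ l := by omega
      have hpre' : m <+: (cs.take l).drop (PySem.Chars.find cs m).toNat :=
        (prefix_drop_take_iff m cs hm _ l).2 ⟨hpre, hfit'⟩
      have hq : PySem.Chars.find (cs.take l) m ≠ -1 := by
        rw [PySem.Chars.find_ne_neg_one_iff]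
        exact infix_of_prefix_drop hpre'
      have hq0 : 0 ≤ PySem.Chars.find (cs.take l) m := by
        have := PySem.Chars.neg_one_le_find (cs.take l) m
        omega
      obtain ⟨hqpre, hqmin⟩ := PySem.Chars.find_spec hq0
      obtain ⟨hqpre', _⟩ := (prefix_drop_take_iff m cs hm _ l).1 hqpre
      have h1 : ¬ (PySem.Chars.find (cs.take l) m).toNat < (PySem.Chars.find cs m).toNat :=
        fun h => hmin _ h hqpre'
      have h2 : ¬ (PySem.Chars.find cs m).toNat < (PySem.Chars.find (cs.take l) m).toNat :=
        fun h => hqmin _ h hpre'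
      omega
    · rw [if_neg (by tauto)]
      rw [PySem.Chars.find_eq_neg_one_iff]
      intro hinf
      obtain ⟨j, hj⟩ := (PySem.Chars.exists_prefix_drop_iff_isIn m (cs.take l)).2
        ((PySem.Chars.isIn_iff_infix m (cs.take l)).2 hinf)
      obtain ⟨hj1, hj2⟩ := (prefix_drop_take_iff m cs hm j l).1 hj
      exact hmin j (by omega) hj1

theorem step_eq (cs m : List Char) (hm : m ≠ []) (l : Nat) (hl : l ≤ cs.length) :
    stripAstep (cs.take l) m = cs.take (stripBstep cs l m) ∧ stripBstep cs l m ≤ cs.length := by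
  unfold stripAstep stripBstep
  rw [find_take cs m hm l]
  by_cases hc : PySem.Chars.find cs m ≠ -1 ∧ PySem.Chars.find cs m + (m.length : Int) ≤ (l : Int)
  · rw [if_pos hc, if_pos hc, if_neg hc.1]
    have hp0 : 0 ≤ PySem.Chars.find cs m := by
      have := PySem.Chars.neg_one_le_find cs m; omega
    have hmlen : 0 < m.length := List.length_pos_of_ne_nil hm
    have hple : (PySem.Chars.find cs m).toNat ≤ l := by omega
    have hplen : (PySem.Chars.find cs m).toNat ≤ cs.length := by
      have := PySem.Chars.find_le_length cs m; omega
    constructor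
    · rw [PySem.Chars.slice_eq_listSlice, PySem.List.slice_to _ hp0, List.take_take,
        Nat.min_eq_left hple, rstrip_take_eq cs _ hplen]
    · exact le_trans (rstripLen_le cs _) hplen
  · rw [if_neg hc, if_neg hc]
    exact ⟨by simp, hl⟩

theorem fold_eq (ms : List (List Char)) (h : ∀ m ∈ ms, m ≠ []) (cs : List Char) :
    ∀ l, l ≤ cs.length →
      ms.foldl stripAstep (cs.take l) = cs.take (ms.foldl (stripBstep cs) l) ∧
      ms.foldl (stripBstep cs) l ≤ cs.length := by
  induction ms with
  | nil => intro l hl; simp [hl]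
  | cons m ms ih =>
    intro l hl
    have hm : m ≠ [] := h m (by simp)
    obtain ⟨h1, h2⟩ := step_eq cs m hm l hl
    simpa [List.foldl_cons, h1] using ih (fun x hx => h x (by simp [hx])) (stripBstep cs l m) h2

-- ===== VERDICT (by name: the statement is the Claim_ definition above) =====
theorem strip_cta_tail_spec : Claim_equal_strip_cta_tail := by
  intro text _
  unfold Spec_strip_cta_tail strip_cta_tail strip_cta_tail_alt
  match text with
  | none => rfl
  | some s =>
    simp only
    by_cases hs : s.toList = []
    · simp [hs]
    · simp only [hs]
      have hne : ∀ m ∈ ctaMarkers, m ≠ [] := by decide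
      have := (fold_eq ctaMarkers hne s.toList s.toList.length le_rfl).1
      rw [List.take_length] at this
      rw [this]
      simp [addDotA, lastNotPunctA, lastNotPunctB]
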